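-- pv_equiv track=rewrite | github.com/jiayewilliamwang/Nonogram_Solver | OneLineSolver.py | _can_place_color
-- ===== SOURCE A (Python) =====
-- def _can_place_color(cells: list, color: int,
--                      l_bound: int, r_bound: int) -> bool:
--     if r_bound >= len(cells):
--         return False
--     mask = 1 << color
--     for i in range(l_bound, r_bound + 1):
--         if (cells[i] & mask) == 0:
--             return False
--     return True
-- ===== SOURCE B (Python) =====
-- def _can_place_color(cells: list, color: int,
--                      l_bound: int, r_bound: int) -> bool:
--     if r_bound >= len(cells):
--         return False
--     mask = 1 << color
--
--     def ok(lo, hi):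
--         if lo > hi:
--             return True
--         if lo == hi:
--             return cells[lo] & mask != 0
--         mid = (lo + hi) // 2
--         return ok(lo, mid) and ok(mid + 1, hi)
--
--     return ok(l_bound, r_bound)
-- ===== Notes on version B (the rewrite author's own statement) =====
-- stated objective: alternative
-- what changed: B replaces A's linear indexed loop with early exit by a divide-and-conquer recursion that splits the index interval at its midpoint and conjoins the two halves, with one-cell and empty intervals as base cases.
import Mathlib
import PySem

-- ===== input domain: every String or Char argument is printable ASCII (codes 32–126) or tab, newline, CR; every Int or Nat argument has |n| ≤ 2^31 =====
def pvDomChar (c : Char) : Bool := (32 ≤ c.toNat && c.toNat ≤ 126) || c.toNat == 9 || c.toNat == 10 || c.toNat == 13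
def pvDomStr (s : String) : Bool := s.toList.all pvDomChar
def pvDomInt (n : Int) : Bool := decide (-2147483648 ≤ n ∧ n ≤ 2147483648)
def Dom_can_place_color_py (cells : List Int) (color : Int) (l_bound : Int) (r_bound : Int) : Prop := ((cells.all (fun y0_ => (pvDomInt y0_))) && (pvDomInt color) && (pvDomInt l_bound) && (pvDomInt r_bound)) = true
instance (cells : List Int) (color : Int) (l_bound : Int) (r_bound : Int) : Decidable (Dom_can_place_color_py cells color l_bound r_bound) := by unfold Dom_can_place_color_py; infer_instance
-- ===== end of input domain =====

-- B replaces A's linear indexed loop with early exit by a divide-and-conquer recursion that splits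
-- the index interval at its midpoint and conjoins the two halves (objective: alternative, same cost).

-- ===== PORT A =====
-- the 'for i in range(l_bound, r_bound + 1): if cells[i] & mask == 0: return False' loop;
-- pyGet? none = Python IndexError, excluded by Pre_ (the port returns false there).
def aLoop (cells : List Int) (mask : Int) : List Int → Bool
  | [] => true
  | i :: rest =>
    match PySem.List.pyGet? cells i with
    | none => false
    | some c => if PySem.Int.band c mask = 0 then false else aLoop cells mask rest

-- '1 << color' is ported as '(1 : Int) <<< color.toNat'; exact since Pre_ gives 0 ≤ color
-- whenever this line is reached (Python raises ValueError on a negative shift).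
def can_place_color_py (cells : List Int) (color : Int) (l_bound : Int) (r_bound : Int) : Bool :=
  if PySem.List.len cells ≤ r_bound then false
  else aLoop cells ((1 : Int) <<< color.toNat) (PySem.List.pyRange l_bound (r_bound + 1) 1)

-- ===== PORT B =====
-- Source B's inner 'ok(lo, hi)': empty interval → True, one cell → bit test (pyGet? none = the
-- IndexError Source B raises there, excluded by Pre_), else split at mid = (lo+hi)//2 and conjoin.
def bOk (cells : List Int) (mask : Int) (lo hi : Int) : Bool :=
  if hi < lo then true
  else if lo = hi then
    match PySem.List.pyGet? cells lo with
    | none => false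
    | some c => decide (PySem.Int.band c mask ≠ 0)
  else
    let mid := PySem.Int.floordiv (lo + hi) 2
    bOk cells mask lo mid && bOk cells mask (mid + 1) hi
termination_by (hi - lo).toNat
decreasing_by
  · have h := PySem.Int.floordiv_two_mid_bounds (lo := lo) (hi := hi) (by omega)
    have h2 : PySem.Int.floordiv (lo + hi) 2 < hi := by
      rw [PySem.Int.floordiv_lt_iff_lt_mul (by omega)]; omega
    omega
  · have h := PySem.Int.floordiv_two_mid_bounds (lo := lo) (hi := hi) (by omega)
    omega

def can_place_color_py_alt (cells : List Int) (color : Int) (l_bound : Int) (r_bound : Int) : Bool :=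
  if PySem.List.len cells ≤ r_bound then false
  else bOk cells ((1 : Int) <<< color.toNat) l_bound r_bound

-- ===== PRECONDITION & SPEC =====
-- Pre_ excludes exactly the inputs on which the Python A raises (both B and A raise there):
-- with r_bound < len(cells), a negative color ('1 << color' raises ValueError) or an l_bound
-- below -len(cells) with a non-empty range (IndexError at the first access).
def Pre_can_place_color_py (cells : List Int) (color : Int) (l_bound : Int) (r_bound : Int) : Prop :=
  (cells.length : Int) ≤ r_bound ∨
    (0 ≤ color ∧ (-(cells.length : Int) ≤ l_bound ∨ r_bound < l_bound))
instance (cells : List Int) (color : Int) (l_bound : Int) (r_bound : Int) : Decidable (Pre_can_place_color_py cells color l_bound r_bound) := by unfold Pre_can_place_color_py; infer_instance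

def pvWitness_can_place_color_py : List Int × Int × Int × Int := ([3, 1], 0, 0, 1)

def Spec_can_place_color_py (cells : List Int) (color : Int) (l_bound : Int) (r_bound : Int) (out : Bool) : Prop := out = can_place_color_py_alt cells color l_bound r_bound
instance (cells : List Int) (color : Int) (l_bound : Int) (r_bound : Int) (out : Bool) : Decidable (Spec_can_place_color_py cells color l_bound r_bound out) := by unfold Spec_can_place_color_py; infer_instance

-- ===== CLAIM (what is proved, stated in full; the proofs are below) =====
def Claim_equal_can_place_color_py : Prop := ∀ (cells : List Int) (color : Int) (l_bound : Int) (r_bound : Int), Dom_can_place_color_py cells color l_bound r_bound → Pre_can_place_color_py cells color l_bound r_bound → Spec_can_place_color_py cells color l_bound r_bound (can_place_color_py cells color l_bound r_bound)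

-- ===== LEMMAS AND PROOFS =====

-- the per-index test both programs apply to index i
def idxTest (cells : List Int) (mask : Int) (i : Int) : Bool :=
  match PySem.List.pyGet? cells i with
  | none => false
  | some c => decide (PySem.Int.band c mask ≠ 0)

theorem aLoop_eq_all (cells : List Int) (mask : Int) :
    ∀ idxs : List Int, aLoop cells mask idxs = idxs.all (idxTest cells mask)
  | [] => rfl
  | i :: rest => by
    simp only [aLoop, idxTest, List.all_cons]
    cases PySem.List.pyGet? cells i with
    | none => rfl
    | some c =>
      by_cases h : PySem.Int.band c mask = 0 <;>
        simp [h, aLoop_eq_all cells mask rest]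

theorem bOk_eq_all (cells : List Int) (mask : Int) :
    ∀ (n : Nat) (lo hi : Int), (hi - lo).toNat ≤ n →
      bOk cells mask lo hi = (PySem.List.pyRange lo (hi + 1) 1).all (idxTest cells mask)
  | 0, lo, hi, hn => by
    rw [bOk]
    by_cases hgt : hi < lo
    · rw [if_pos hgt, PySem.List.pyRange_one_eq_nil (by omega)]; rfl
    · have heq : lo = hi := by omega
      rw [if_neg hgt, if_pos heq, heq, PySem.List.pyRange_one_singleton]
      simp only [List.all_cons, List.all_nil, Bool.and_true, idxTest]
  | n + 1, lo, hi, hn => by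
    rw [bOk]
    by_cases hgt : hi < lo
    · rw [if_pos hgt, PySem.List.pyRange_one_eq_nil (by omega)]; rfl
    · by_cases heq : lo = hi
      · rw [if_neg hgt, if_pos heq, heq, PySem.List.pyRange_one_singleton]
        simp only [List.all_cons, List.all_nil, Bool.and_true, idxTest]
      · rw [if_neg hgt, if_neg heq]
        have hb := PySem.Int.floordiv_two_mid_bounds (lo := lo) (hi := hi) (by omega)
        have h2 : PySem.Int.floordiv (lo + hi) 2 < hi := by
          rw [PySem.Int.floordiv_lt_iff_lt_mul (by omega)]; omega
        set mid := PySem.Int.floordiv (lo + hi) 2 with hmid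
        show (bOk cells mask lo mid && bOk cells mask (mid + 1) hi) = _
        rw [PySem.List.pyRange_one_append lo (mid + 1) (hi + 1) (by omega) (by omega),
          List.all_append,
          bOk_eq_all cells mask n lo mid (by omega),
          bOk_eq_all cells mask n (mid + 1) hi (by omega)]

-- ===== VERDICT (by name: the statement is the Claim_ definition above) =====
theorem can_place_color_py_spec : Claim_equal_can_place_color_py := by
  unfold Claim_equal_can_place_color_py
  intro cells color l r _hdom _hpre
  unfold Spec_can_place_color_py can_place_color_py can_place_color_py_alt
  by_cases hg : PySem.List.len cells ≤ r
  · rw [if_pos hg, if_pos hg]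
  · rw [if_neg hg, if_neg hg, aLoop_eq_all,
      bOk_eq_all cells ((1 : Int) <<< color.toNat) (r + 1 - l).toNat l r (by omega)]
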